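-- pv_equiv track=rewrite | github.com/yanzhenxing123/algorithms | 秋招笔试/美团/triplet_count_optimized.py | count_triplets_best
-- ===== SOURCE A (Python) =====
-- def count_triplets_best(arr):
--     """
--     最佳版本：使用排序和二分查找优化
--     时间复杂度：O(n² log n)
--     """
--     n = len(arr)
--     count = 0
--
--     # 对于每个位置j
--     for j in range(1, n - 1):
--         aj = arr[j]
--
--         # 收集左边大于aj的元素
--         left_greater = []
--         for i in range(j):
--             if arr[i] > aj:
--                 left_greater.append(arr[i])
--
--         # 收集右边大于aj的元素并排序
--         right_greater = []
--         for k in range(j + 1, n):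
--             if arr[k] > aj:
--                 right_greater.append(arr[k])
--
--         # 排序右边元素，便于二分查找
--         right_greater.sort()
--
--         # 对于每个左边的元素ai
--         for ai in left_greater:
--             # 使用二分查找找到右边小于ai的元素数量
--             # 找到第一个不小于ai的位置
--             left, right = 0, len(right_greater)
--             while left < right:
--                 mid = (left + right) // 2
--                 if right_greater[mid] < ai:
--                     left = mid + 1
--                 else:
--                     right = mid
--
--             count += left
--
--     return count
-- ===== SOURCE B (Python) =====
-- def count_triplets_best(arr):
--     # Simpler: direct counting, no sorting or binary search.
--     n = len(arr)
--     count = 0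
--     for j in range(1, n - 1):
--         for k in range(j + 1, n):
--             if arr[k] > arr[j]:
--                 for i in range(j):
--                     if arr[i] > arr[k]:
--                         count += 1
--     return count
-- ===== Notes on version B (the rewrite author's own statement) =====
-- stated objective: simpler
-- what changed: Replaces A's per-j collect/sort/binary-search machinery with a plain three-level counting loop that checks arr[i] > arr[k] > arr[j] directly.
import Mathlib
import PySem

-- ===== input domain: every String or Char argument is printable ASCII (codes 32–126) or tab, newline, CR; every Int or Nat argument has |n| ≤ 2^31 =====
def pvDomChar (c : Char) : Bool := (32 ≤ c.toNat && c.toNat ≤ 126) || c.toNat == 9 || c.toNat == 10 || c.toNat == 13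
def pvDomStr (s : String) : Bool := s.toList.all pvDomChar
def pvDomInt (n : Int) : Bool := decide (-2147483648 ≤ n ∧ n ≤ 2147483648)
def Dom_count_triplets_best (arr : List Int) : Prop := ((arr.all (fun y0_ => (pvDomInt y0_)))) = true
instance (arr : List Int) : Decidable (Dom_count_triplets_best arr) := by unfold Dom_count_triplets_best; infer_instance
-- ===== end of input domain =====

-- B replaces A's per-j collect/sort/binary-search with a plain three-level counting loop (simpler, not faster); return values proved equal on all inputs.


-- ===== PORT A =====
-- binary-search lower-bound while-loop of A, transliterated (indices as Nat: Python's
-- left/right stay nonnegative; Nat '/' 2 equals Python '//' 2 on these values)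
def pvBsLoop (rg : List Int) (ai : Int) (left right : Nat) : Nat :=
  if _h : left < right then
    if PySem.List.pyGetD rg (((left + right) / 2 : Nat) : Int) 0 < ai then
      pvBsLoop rg ai ((left + right) / 2 + 1) right
    else
      pvBsLoop rg ai left ((left + right) / 2)
  else left
termination_by right - left
decreasing_by all_goals omega

-- indices produced by range() are always in bounds here, so pyGetD with default 0 is exact
def count_triplets_best (arr : List Int) : Int :=
  let n : Int := arr.length
  (PySem.List.pyRange 1 (n - 1) 1).foldl (fun count j =>
    let aj := PySem.List.pyGetD arr j 0
    let left_greater := (PySem.List.pyRange 0 j 1).foldl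
      (fun acc i => if PySem.List.pyGetD arr i 0 > aj then acc ++ [PySem.List.pyGetD arr i 0] else acc) []
    let right_greater := (PySem.List.pyRange (j + 1) n 1).foldl
      (fun acc k => if PySem.List.pyGetD arr k 0 > aj then acc ++ [PySem.List.pyGetD arr k 0] else acc) []
    let rgs := PySem.List.sorted right_greater (fun x => x) false
    left_greater.foldl (fun c ai => c + (pvBsLoop rgs ai 0 rgs.length : Int)) count) 0

-- ===== PORT B =====
def count_triplets_best_alt (arr : List Int) : Int :=
  let n : Int := arr.length
  (PySem.List.pyRange 1 (n - 1) 1).foldl (fun count j =>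
    (PySem.List.pyRange (j + 1) n 1).foldl (fun c k =>
      if PySem.List.pyGetD arr k 0 > PySem.List.pyGetD arr j 0 then
        (PySem.List.pyRange 0 j 1).foldl
          (fun c2 i => if PySem.List.pyGetD arr i 0 > PySem.List.pyGetD arr k 0 then c2 + 1 else c2) c
      else c) count) 0

-- ===== PRECONDITION & SPEC =====
def Spec_count_triplets_best (arr : List Int) (out : Int) : Prop := out = count_triplets_best_alt arr
instance (arr : List Int) (out : Int) : Decidable (Spec_count_triplets_best arr out) := by unfold Spec_count_triplets_best; infer_instance

-- ===== CLAIM (what is proved, stated in full; the proofs are below) =====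
def Claim_equal_count_triplets_best : Prop := ∀ (arr : List Int), Dom_count_triplets_best arr → Spec_count_triplets_best arr (count_triplets_best arr)

-- ===== LEMMAS AND PROOFS =====

theorem pvBsLoop_spec (rg : List Int) (ai : Int)
    (hs : rg.Pairwise (· ≤ ·)) :
    ∀ (left right : Nat), left ≤ right → right ≤ rg.length →
    (∀ m (hm : m < rg.length), m < left → rg[m] < ai) →
    (∀ m (hm : m < rg.length), right ≤ m → ¬ rg[m] < ai) →
    left ≤ pvBsLoop rg ai left right ∧ pvBsLoop rg ai left right ≤ right ∧
      (∀ m (hm : m < rg.length), (m < pvBsLoop rg ai left right ↔ rg[m] < ai)) := by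
  have hmono : ∀ (p q : Nat) (hp : p < rg.length) (hq : q < rg.length), p ≤ q → rg[p] ≤ rg[q] := by
    intro p q hp hq hpq
    rcases Nat.lt_or_ge p q with h | h
    · exact (List.pairwise_iff_getElem.mp hs p q hp hq h)
    · have : p = q := by omega
      subst this; exact le_refl _
  intro left right
  induction left, right using pvBsLoop.induct rg ai with
  | case1 left right hlt hcmp ih =>
    intro hlr hrlen h1 h2
    rw [pvBsLoop]; simp only [dif_pos hlt, if_pos hcmp]
    have hmidlt : (left + right) / 2 < rg.length := by omega
    have hmid : PySem.List.pyGetD rg (((left + right) / 2 : Nat) : Int) 0 = rg[(left + right) / 2] := by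
      rw [PySem.List.pyGetD_natCast, List.getD_eq_getElem _ _ hmidlt]
    rw [hmid] at hcmp
    refine ?_
    have := ih (by omega) hrlen
      (by
        intro m hm hmlt
        rcases Nat.lt_or_ge m left with h | h
        · exact h1 m hm h
        · exact lt_of_le_of_lt (hmono m _ hm hmidlt (by omega)) hcmp)
      h2
    exact ⟨by omega, this.2.1, this.2.2⟩
  | case2 left right hlt hcmp ih =>
    intro hlr hrlen h1 h2
    rw [pvBsLoop]; simp only [dif_pos hlt, if_neg hcmp]
    have hmidlt : (left + right) / 2 < rg.length := by omega
    have hmid : PySem.List.pyGetD rg (((left + right) / 2 : Nat) : Int) 0 = rg[(left + right) / 2] := by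
      rw [PySem.List.pyGetD_natCast, List.getD_eq_getElem _ _ hmidlt]
    rw [hmid] at hcmp
    have := ih (by omega) (by omega) h1
      (by
        intro m hm hge hcon
        exact hcmp (lt_of_le_of_lt (hmono _ m hmidlt hm hge) hcon))
    exact ⟨this.1, by omega, this.2.2⟩
  | case3 left right hnlt =>
    intro hlr hrlen h1 h2
    rw [pvBsLoop]; simp only [dif_neg hnlt]
    refine ⟨le_refl _, by omega, ?_⟩
    intro m hm
    constructor
    · exact h1 m hm
    · intro hv
      by_contra hge
      exact h2 m hm (by omega) hv

theorem pv_countP_of_boundary (l : List Int) (p : Int → Bool) (L : Nat)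
    (hL : L ≤ l.length) (h : ∀ m (hm : m < l.length), (m < L ↔ p l[m] = true)) :
    l.countP p = L := by
  induction l generalizing L with
  | nil => simp at hL; simp [hL]
  | cons x t ih =>
    cases L with
    | zero =>
      have hx : p x = false := by
        cases hpx : p x with
        | false => rfl
        | true => exact absurd ((h 0 (by simp)).mpr (by simp [hpx])) (by omega)
      have ht : t.countP p = 0 := by
        refine ih 0 (by omega) ?_
        intro m hm
        constructor
        · omega
        · intro hc
          exact absurd ((h (m + 1) (by simp; omega)).mpr (by simpa using hc)) (by omega)
      simp [ht, hx]
    | succ L' =>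
      have hx : p x = true := (h 0 (by simp)).mp (by omega)
      have ht : t.countP p = L' := by
        refine ih L' (by simpa using hL) ?_
        intro m hm
        have := h (m + 1) (by simpa using Nat.succ_lt_succ hm)
        simpa [Nat.succ_lt_succ_iff] using this
      simp [ht, hx]

theorem pvBsLoop_eq_countP (rg : List Int) (ai : Int) (hs : rg.Pairwise (· ≤ ·)) :
    pvBsLoop rg ai 0 rg.length = rg.countP (fun y => decide (y < ai)) := by
  obtain ⟨h0, hle, hiff⟩ := pvBsLoop_spec rg ai hs 0 rg.length (Nat.zero_le _) (le_refl _)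
    (by intro m hm hc; omega) (by intro m hm hc; omega)
  exact (pv_countP_of_boundary rg _ _ hle (by intro m hm; simpa using hiff m hm)).symm

theorem pv_sum_ite_count (x : Int) (R : List Int) :
    (R.map (fun y => if y < x then (1 : Int) else 0)).sum
      = (R.countP (fun y => decide (y < x)) : Int) := by
  induction R with
  | nil => simp
  | cons y s ih2 =>
    by_cases h : y < x <;> simp [h, ih2] <;> ring

-- Fubini over pairs of lists
theorem pv_exchange (L R : List Int) :
    (L.map (fun x => (R.countP (fun y => decide (y < x)) : Int))).sum
      = (R.map (fun y => (L.countP (fun x => decide (y < x)) : Int))).sum := by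
  induction L with
  | nil => simp
  | cons x t ih =>
    have hsplit : ∀ (f g : Int → Int) (S : List Int),
        (S.map (fun y => f y + g y)).sum = (S.map f).sum + (S.map g).sum := by
      intro f g S
      induction S with
      | nil => simp
      | cons y s ih2 => simp [ih2]; ring
    have hcnt := pv_sum_ite_count x R
    have hmap : (R.map (fun y => ((x :: t).countP (fun z => decide (y < z)) : Int)))
        = R.map (fun y => (t.countP (fun z => decide (y < z)) : Int) + (if y < x then 1 else 0)) := by
      refine List.map_congr_left (fun y _ => ?_)
      rw [List.countP_cons]
      by_cases h : y < x <;> simp [h]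
    rw [List.map_cons, List.sum_cons, ih, hmap, hsplit, hcnt]
    ring

theorem pv_sum_map_ite (l : List Int) (p : Int → Prop) [DecidablePred p] (h : Int → Int) :
    (l.map (fun k => if p k then h k else 0)).sum = ((l.filter (fun k => decide (p k))).map h).sum := by
  induction l with
  | nil => simp
  | cons x t ih =>
    by_cases hx : p x <;> simp [hx, ih]

theorem pv_foldl_build (l : List Int) (f : Int → Int) (aj : Int) (acc : List Int) :
    l.foldl (fun a x => if f x > aj then a ++ [f x] else a) acc
      = acc ++ ((l.filter (fun x => decide (aj < f x))).map f) := by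
  induction l generalizing acc with
  | nil => simp
  | cons x t ih =>
    by_cases h : aj < f x <;> simp [List.filter_cons, h, ih, gt_iff_lt]

theorem pv_foldl_addInt (l : List Int) (g : Int → Int) (a : Int) :
    l.foldl (fun acc x => acc + g x) a = a + (l.map g).sum := by
  induction l generalizing a with
  | nil => simp
  | cons x t ih => simp [ih]; ring

theorem pv_foldl_count (l : List Int) (p : Int → Prop) [DecidablePred p] (a : Int) :
    l.foldl (fun acc x => if p x then acc + 1 else acc) a
      = a + (l.countP (fun x => decide (p x)) : Int) := by
  induction l generalizing a with
  | nil => simp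
  | cons x t ih =>
    by_cases h : p x <;> simp [List.countP_cons, h, ih] <;> ring

theorem pv_foldl_ite_add (l : List Int) (p : Int → Prop) [DecidablePred p] (h : Int → Int) (a : Int) :
    l.foldl (fun c x => if p x then c + h x else c) a
      = a + (l.map (fun x => if p x then h x else 0)).sum := by
  induction l generalizing a with
  | nil => simp
  | cons x t ih =>
    by_cases hx : p x <;> simp [hx, ih] <;> ring

-- the per-j loop bodies agree, for ANY value lists I (left indices) and K (right indices)
theorem pv_core (f : Int → Int) (aj : Int) (I K : List Int) (count : Int) :
    ((I.foldl (fun acc i => if f i > aj then acc ++ [f i] else acc) []).foldl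
       (fun c x =>
         c + (pvBsLoop (PySem.List.sorted (K.foldl (fun acc k => if f k > aj then acc ++ [f k] else acc) []) (fun x => x) false) x 0
               (PySem.List.sorted (K.foldl (fun acc k => if f k > aj then acc ++ [f k] else acc) []) (fun x => x) false).length : Int)) count)
    = K.foldl (fun c k =>
        if f k > aj then I.foldl (fun c2 i => if f i > f k then c2 + 1 else c2) c else c) count := by
  rw [pv_foldl_build, pv_foldl_build]
  simp only [List.nil_append]
  set rg : List Int := (K.filter (fun x => decide (aj < f x))).map f with hrg
  set rgs : List Int := PySem.List.sorted rg (fun x => x) false with hrgs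
  set L : List Int := (I.filter (fun x => decide (aj < f x))).map f with hL
  have hbs : ∀ x, pvBsLoop rgs x 0 rgs.length = rg.countP (fun y => decide (y < x)) := by
    intro x
    rw [pvBsLoop_eq_countP rgs x (by simpa using PySem.List.sorted_pairwise rg (fun x => x))]
    exact (PySem.List.sorted_perm rg (fun x => x) false).countP_eq _
  -- left side: sum over L of the bsearch counts, then exchange
  rw [pv_foldl_addInt]
  have hmapbs : L.map (fun x => (pvBsLoop rgs x 0 rgs.length : Int))
      = L.map (fun x => (rg.countP (fun y => decide (y < x)) : Int)) := by
    refine List.map_congr_left (fun x _ => ?_)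
    rw [hbs]
  rw [hmapbs, pv_exchange]
  -- right side: turn the conditional loop into a filtered sum
  have hstep : (fun (c k : Int) =>
      if f k > aj then I.foldl (fun c2 i => if f i > f k then c2 + 1 else c2) c else c)
      = (fun (c k : Int) => if aj < f k then c + (I.countP (fun i => decide (f k < f i)) : Int) else c) := by
    funext c k
    by_cases h : aj < f k <;> simp [gt_iff_lt, h, pv_foldl_count]
  rw [hstep, pv_foldl_ite_add, pv_sum_map_ite]
  congr 1
  rw [hrg, List.map_map]
  refine congrArg List.sum ?_
  refine List.map_congr_left (fun k hk => ?_)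
  have hkgt : aj < f k := by
    have := List.of_mem_filter hk
    simpa using this
  simp only [Function.comp]
  rw [hL, List.countP_map, List.countP_filter]
  congr 1
  refine List.countP_congr (fun i _ => ?_)
  simp only [Function.comp]
  by_cases h : f k < f i
  · simp [h, lt_trans hkgt h]
  · simp [h]

theorem pv_foldl_funext {α β : Type} (l : List α) (f g : β → α → β) (init : β)
    (h : ∀ c x, f c x = g c x) : l.foldl f init = l.foldl g init := by
  induction l generalizing init with
  | nil => rfl
  | cons x t ih => simp only [List.foldl_cons, h]; exact ih _

theorem pv_body_eq (arr : List Int) (j count : Int) :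
    (let aj := PySem.List.pyGetD arr j 0
     let left_greater := (PySem.List.pyRange 0 j 1).foldl
       (fun acc i => if PySem.List.pyGetD arr i 0 > aj then acc ++ [PySem.List.pyGetD arr i 0] else acc) []
     let right_greater := (PySem.List.pyRange (j + 1) (arr.length : Int) 1).foldl
       (fun acc k => if PySem.List.pyGetD arr k 0 > aj then acc ++ [PySem.List.pyGetD arr k 0] else acc) []
     let rgs := PySem.List.sorted right_greater (fun x => x) false
     left_greater.foldl (fun c ai => c + (pvBsLoop rgs ai 0 rgs.length : Int)) count)
    = (PySem.List.pyRange (j + 1) (arr.length : Int) 1).foldl (fun c k =>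
        if PySem.List.pyGetD arr k 0 > PySem.List.pyGetD arr j 0 then
          (PySem.List.pyRange 0 j 1).foldl
            (fun c2 i => if PySem.List.pyGetD arr i 0 > PySem.List.pyGetD arr k 0 then c2 + 1 else c2) c
        else c) count := by
  exact pv_core (fun i => PySem.List.pyGetD arr i 0) (PySem.List.pyGetD arr j 0)
    (PySem.List.pyRange 0 j 1) (PySem.List.pyRange (j + 1) (arr.length : Int) 1) count

-- ===== VERDICT (by name: the statement is the Claim_ definition above) =====
theorem count_triplets_best_spec : Claim_equal_count_triplets_best := by
  intro arr _
  show count_triplets_best arr = count_triplets_best_alt arr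
  simp only [count_triplets_best, count_triplets_best_alt]
  exact pv_foldl_funext _ _ _ _ (fun c j => pv_body_eq arr j c)
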